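-- pv_equiv track=rewrite | github.com/almeidaitalo/ListaExercicio | SegundaQ2/VetorDesordenado.py | calcular_intervalo_vetor_desordenado
-- ===== SOURCE A (Python) =====
-- def calcular_intervalo_vetor_desordenado(vetor_desordenado):
--     """
--     Calcula o intervalo de um conjunto de números representado por um vetor desordenado.
--     """
--     if len(vetor_desordenado) < 2:
--         return 0
--
--     # Inicializa o menor e o maior com o primeiro elemento do vetor
--     menor = vetor_desordenado[0]
--     maior = vetor_desordenado[0]
--
--     # Percorre o restante do vetor a partir do segundo elemento
--     for i in range(1, len(vetor_desordenado)):
--         # Atualiza o menor valor se encontrar um elemento menor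
--         if vetor_desordenado[i] < menor:
--             menor = vetor_desordenado[i]
--
--         # Atualiza o maior valor se encontrar um elemento maior
--         if vetor_desordenado[i] > maior:
--             maior = vetor_desordenado[i]
--
--     return maior - menor
-- ===== SOURCE B (Python) =====
-- def calcular_intervalo_vetor_desordenado(vetor_desordenado):
--     if len(vetor_desordenado) < 2:
--         return 0
--     ordenado = sorted(vetor_desordenado)
--     return ordenado[-1] - ordenado[0]
-- ===== Notes on version B (the rewrite author's own statement) =====
-- stated objective: alternative
-- what changed: Replaces the single fused scan tracking running min and max with a sort-based algorithm: sort the vector once and subtract the first element of the sorted order from the last.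
import Mathlib
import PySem

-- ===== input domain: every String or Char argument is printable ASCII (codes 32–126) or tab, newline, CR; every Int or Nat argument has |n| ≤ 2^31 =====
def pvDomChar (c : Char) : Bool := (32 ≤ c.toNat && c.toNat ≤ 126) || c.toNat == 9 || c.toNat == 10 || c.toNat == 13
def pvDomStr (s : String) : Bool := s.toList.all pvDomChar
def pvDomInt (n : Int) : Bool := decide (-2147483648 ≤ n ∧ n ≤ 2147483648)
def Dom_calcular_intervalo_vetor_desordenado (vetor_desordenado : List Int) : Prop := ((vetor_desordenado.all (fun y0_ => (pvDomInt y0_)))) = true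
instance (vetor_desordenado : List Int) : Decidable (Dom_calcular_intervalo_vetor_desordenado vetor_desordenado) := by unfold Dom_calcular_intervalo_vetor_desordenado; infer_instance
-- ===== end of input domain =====

-- B replaces A's fused single-scan min/max tracking with a sort-based algorithm: sort the
-- vector and subtract the first sorted element from the last; objective: alternative.

-- ===== PORT A =====
def calcular_intervalo_vetor_desordenado (vetor_desordenado : List Int) : Int :=
  if vetor_desordenado.length < 2 then 0
  else
    let first := PySem.List.pyGetD vetor_desordenado 0 0
    let st := (PySem.List.pyRange 1 vetor_desordenado.length 1).foldl
      (fun (st : Int × Int) i =>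
        let x := PySem.List.pyGetD vetor_desordenado i 0
        let menor := if x < st.1 then x else st.1
        let maior := if x > st.2 then x else st.2
        (menor, maior)) (first, first)
    st.2 - st.1

-- ===== PORT B =====
def calcular_intervalo_vetor_desordenado_alt (vetor_desordenado : List Int) : Int :=
  if vetor_desordenado.length < 2 then 0
  else
    let ordenado := PySem.List.sorted vetor_desordenado (fun y => y)
    PySem.List.pyGetD ordenado (-1) 0 - PySem.List.pyGetD ordenado 0 0

-- ===== PRECONDITION & SPEC =====
def Spec_calcular_intervalo_vetor_desordenado (vetor_desordenado : List Int) (out : Int) : Prop := out = calcular_intervalo_vetor_desordenado_alt vetor_desordenado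
instance (vetor_desordenado : List Int) (out : Int) : Decidable (Spec_calcular_intervalo_vetor_desordenado vetor_desordenado out) := by unfold Spec_calcular_intervalo_vetor_desordenado; infer_instance

-- ===== CLAIM (what is proved, stated in full; the proofs are below) =====
def Claim_equal_calcular_intervalo_vetor_desordenado : Prop := ∀ (vetor_desordenado : List Int), Dom_calcular_intervalo_vetor_desordenado vetor_desordenado → Spec_calcular_intervalo_vetor_desordenado vetor_desordenado (calcular_intervalo_vetor_desordenado vetor_desordenado)

-- ===== LEMMAS AND PROOFS =====

-- loop body of A's fold, named so the pyRange/pyGetD bridge lemma can abstract it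
def pvStep (st : Int × Int) (y : Int) : Int × Int :=
  (if y < st.1 then y else st.1, if y > st.2 then y else st.2)

-- The fused pair-fold computes (running min, running max) componentwise.
theorem pv_fused_fold (t : List Int) (m M : Int) :
    t.foldl pvStep (m, M) = (t.foldl min m, t.foldl max M) := by
  induction t generalizing m M with
  | nil => rfl
  | cons x t ih =>
      simp only [List.foldl_cons, pvStep, ih]
      congr 1 <;>
      · congr 1
        omega

-- The head of sorted (x :: t) is the running minimum foldl min x t.
theorem pv_sorted_head (x : Int) (t : List Int) :
    PySem.List.pyGetD (PySem.List.sorted (x :: t) (fun y => y)) 0 0 = t.foldl min x := by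
  rcases hs : PySem.List.sorted (x :: t) (fun y => y) with _ | ⟨m, s⟩
  · exact absurd ((PySem.List.sorted_eq_nil_iff _ _ _).1 hs) (by simp)
  · have hmin : ∀ y ∈ x :: t, m ≤ y := PySem.List.key_head_sorted_le _ _ hs
    have hm_mem : m ∈ x :: t := by
      have : m ∈ PySem.List.sorted (x :: t) (fun y : Int => y) := by rw [hs]; simp
      exact (PySem.List.mem_sorted _ _ _ _).1 this
    have h1 := PySem.List.foldl_min_le t x
    have hle : t.foldl min x ≤ m := by
      rcases List.mem_cons.1 hm_mem with h | h
      · rw [h]; exact h1.1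
      · exact h1.2 m h
    have hge : m ≤ t.foldl min x := by
      rcases PySem.List.foldl_min_mem t x with h | h
      · rw [h]; exact hmin x (by simp)
      · exact hmin _ (by simp [h])
    simp [PySem.List.pyGetD, PySem.List.pyGet?, PySem.List.pyIdx?, le_antisymm hle hge]

-- The last element (index -1) of sorted (x :: t) is the running maximum foldl max x t.
theorem pv_sorted_last (x : Int) (t : List Int) :
    PySem.List.pyGetD (PySem.List.sorted (x :: t) (fun y => y)) (-1) 0 = t.foldl max x := by
  rcases hs : PySem.List.sorted (x :: t) (fun y => y) with _ | ⟨m, s⟩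
  · exact absurd ((PySem.List.sorted_eq_nil_iff _ _ _).1 hs) (by simp)
  · have hpair : (PySem.List.sorted (x :: t) (fun y : Int => y)).Pairwise (fun a b => a ≤ b) :=
      PySem.List.sorted_pairwise (x :: t) (fun y => y)
    rw [hs] at hpair
    have hlast_mem : (m :: s).getLast (by simp) ∈ x :: t := by
      have : (m :: s).getLast (by simp) ∈ PySem.List.sorted (x :: t) (fun y : Int => y) := by
        rw [hs]; exact List.getLast_mem _
      exact (PySem.List.mem_sorted _ _ _ _).1 this
    have hmax : ∀ y ∈ x :: t, y ≤ (m :: s).getLast (by simp) := by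
      intro y hy
      have hy' : y ∈ m :: s := by
        rw [← hs]; exact (PySem.List.mem_sorted _ _ _ _).2 hy
      rcases List.getElem_of_mem hy' with ⟨p, hp, hyp⟩
      rw [List.getLast_eq_getElem, ← hyp]
      have hp' : p < s.length + 1 := by simpa using hp
      rcases Nat.lt_or_ge p s.length with hlt | hge
      · have := List.pairwise_iff_getElem.1 hpair p ((m :: s).length - 1)
          hp (by simp) (by simp; omega)
        simpa using this
      · have hpe : p = s.length := by omega
        exact le_of_eq (by simp [hpe])
    have h1 := PySem.List.le_foldl_max t x
    have hle : (m :: s).getLast (by simp) ≤ t.foldl max x := by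
      rcases List.mem_cons.1 hlast_mem with h | h
      · rw [h]; exact h1.1
      · exact h1.2 _ h
    have hge : t.foldl max x ≤ (m :: s).getLast (by simp) := by
      rcases PySem.List.foldl_max_mem t x with h | h
      · rw [h]; exact hmax x (by simp)
      · exact hmax _ (by simp [h])
    have hidx : PySem.List.pyGetD (m :: s) (-1) 0 = (m :: s).getLast (by simp) := by
      simp [PySem.List.pyGetD, PySem.List.pyGet?_neg_one,
        List.getLast?_eq_some_getLast (l := m :: s) (by simp)]
    rw [hidx]
    exact le_antisymm hle hge

-- ===== VERDICT (by name: the statement is the Claim_ definition above) =====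
theorem calcular_intervalo_vetor_desordenado_spec : Claim_equal_calcular_intervalo_vetor_desordenado := by
  intro v _
  unfold Spec_calcular_intervalo_vetor_desordenado
  unfold calcular_intervalo_vetor_desordenado calcular_intervalo_vetor_desordenado_alt
  by_cases h : v.length < 2
  · simp [h]
  · simp only [h, if_false]
    match v, h with
    | x :: t, _ =>
      simp only [PySem.List.pyGetD_zero_cons]
      have hF : (fun (st : Int × Int) (i : Int) =>
          (if PySem.List.pyGetD (x :: t) i 0 < st.1 then PySem.List.pyGetD (x :: t) i 0 else st.1,
           if PySem.List.pyGetD (x :: t) i 0 > st.2 then PySem.List.pyGetD (x :: t) i 0 else st.2))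
          = fun st i => pvStep st (PySem.List.pyGetD (x :: t) i 0) := rfl
      rw [hF, PySem.List.foldl_pyRange_pyGetD' (x :: t) 0 pvStep (x, x) (a := 1) (by omega)]
      simp only [Int.toNat_one, List.drop_succ_cons, List.drop_zero]
      rw [pv_fused_fold, pv_sorted_head, pv_sorted_last]
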